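-- pv_equiv track=rewrite | github.com/ednussi/Intro-to-CS | Ex5/GetToTheZero.py | james_on_the_move
-- ===== SOURCE A (Python) =====
-- FIRST_CELL_IN_BOARD = 0
--
-- def james_on_the_move(start, board, moving_list):
--     # We Got to the zero !
--     if start == len(board)-1:
--         return True
--
--     # checks if your move is out of the list size
--     if start >= len(board) or start < FIRST_CELL_IN_BOARD:
--         return False
--
--     # checks if i already been in this cell
--     if moving_list[start] == True:
--         return False
--
--     # conclusion - we are not in the right place and we can make a valid move
--     # mark the cell we are on
--     moving_list[start] = True
--     return james_on_the_move(start+board[start], board, moving_list) or (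
--         james_on_the_move(start-board[start], board, moving_list))
-- ===== SOURCE B (Python) =====
-- FIRST_CELL_IN_BOARD = 0
--
-- def james_on_the_move(start, board, moving_list):
--     # Iterative DFS with an explicit stack instead of recursion.
--     last = len(board) - 1
--     stack = [start]
--     while stack:
--         cell = stack.pop()
--         if cell == last:
--             return True
--         if cell >= len(board) or cell < FIRST_CELL_IN_BOARD:
--             continue
--         if moving_list[cell] == True:
--             continue
--         moving_list[cell] = True
--         stack.append(cell - board[cell])
--         stack.append(cell + board[cell])
--     return False
-- ===== Notes on version B (the rewrite author's own statement) =====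
-- stated objective: alternative
-- what changed: The recursive DFS (with Python call-stack and short-circuit or) is replaced by an iterative loop over an explicit list-as-stack that pushes the backward jump before the forward one, reproducing the same visit order, return value and marks.
-- outside the precondition, e.g. on james_on_the_move(0, [2, 5], [False]): A returns False, B returns False
import Mathlib
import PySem

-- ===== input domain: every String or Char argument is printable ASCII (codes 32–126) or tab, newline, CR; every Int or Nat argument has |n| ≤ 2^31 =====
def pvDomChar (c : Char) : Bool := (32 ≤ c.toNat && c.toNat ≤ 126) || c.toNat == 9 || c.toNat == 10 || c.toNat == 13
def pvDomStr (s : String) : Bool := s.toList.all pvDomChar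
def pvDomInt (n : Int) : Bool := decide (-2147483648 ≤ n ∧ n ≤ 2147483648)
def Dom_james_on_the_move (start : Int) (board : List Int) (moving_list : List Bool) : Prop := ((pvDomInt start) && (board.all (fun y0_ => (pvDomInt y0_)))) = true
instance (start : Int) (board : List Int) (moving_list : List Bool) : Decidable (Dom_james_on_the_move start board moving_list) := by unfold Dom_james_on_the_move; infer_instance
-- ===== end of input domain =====

-- B replaces A's recursive DFS by an iterative explicit-stack loop (same visit order and
-- return value; both Pythons mutate moving_list identically, the theorems are about the return value).

-- ===== PORT A =====
-- A's recursion threads the mutated moving_list through the two calls, so the port returns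
-- (result, moving_list); the fuel 'moving_list.count false + 1' is sufficient on Pre_ because
-- every recursive call first marks one unvisited cell (proved by the fuel-irrelevance lemmas below).
def jamesAux : Nat → Int → List Int → List Bool → Bool × List Bool
  | 0, _, _, ml => (false, ml)
  | f+1, start, board, ml =>
    if start = (board.length : Int) - 1 then (true, ml)
    else if (board.length : Int) ≤ start ∨ start < 0 then (false, ml)
    else if PySem.List.pyGetD ml start false = true then (false, ml)
    else
      let ml1 := PySem.List.pySetD ml start true
      let v := PySem.List.pyGetD board start 0
      let p := jamesAux f (start + v) board ml1
      if p.1 then (true, p.2) else jamesAux f (start - v) board p.2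

def james_on_the_move (start : Int) (board : List Int) (moving_list : List Bool) : Bool :=
  (jamesAux (moving_list.count false + 1) start board moving_list).1

-- ===== PORT B =====
-- Source B's while-loop over the explicit stack; fuel '3 * count false + 2' bounds the number of
-- iterations (each iteration pops one cell or marks one unvisited cell while pushing two).
def jamesLoop : Nat → List Int → List Int → List Bool → Bool
  | _, _, [], _ => false
  | 0, _, _ :: _, _ => false
  | f+1, board, cell :: rest, ml =>
    if cell = (board.length : Int) - 1 then true
    else if (board.length : Int) ≤ cell ∨ cell < 0 then jamesLoop f board rest ml
    else if PySem.List.pyGetD ml cell false = true then jamesLoop f board rest ml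
    else
      jamesLoop f board
        ((cell + PySem.List.pyGetD board cell 0) :: (cell - PySem.List.pyGetD board cell 0) :: rest)
        (PySem.List.pySetD ml cell true)

def james_on_the_move_alt (start : Int) (board : List Int) (moving_list : List Bool) : Bool :=
  jamesLoop (3 * moving_list.count false + 2) board [start] moving_list

-- ===== PRECONDITION & SPEC =====
-- Pre_ excludes moving_list shorter than board unless start ends the walk immediately, because A
-- raises IndexError when the walk reaches a cell beyond moving_list; a few excluded inputs still
-- return in A (walks that happen to stop early), on which B agrees with A anyway.
def Pre_james_on_the_move (start : Int) (board : List Int) (moving_list : List Bool) : Prop :=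
  board.length ≤ moving_list.length ∨ start < 0 ∨ (board.length : Int) - 1 ≤ start
instance (start : Int) (board : List Int) (moving_list : List Bool) : Decidable (Pre_james_on_the_move start board moving_list) := by unfold Pre_james_on_the_move; infer_instance

def pvWitness_james_on_the_move : Int × List Int × List Bool := (0, [1, 1], [false, false])

def Spec_james_on_the_move (start : Int) (board : List Int) (moving_list : List Bool) (out : Bool) : Prop := out = james_on_the_move_alt start board moving_list
instance (start : Int) (board : List Int) (moving_list : List Bool) (out : Bool) : Decidable (Spec_james_on_the_move start board moving_list out) := by unfold Spec_james_on_the_move; infer_instance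

-- ===== CLAIM (what is proved, stated in full; the proofs are below) =====
def Claim_equal_james_on_the_move : Prop := ∀ (start : Int) (board : List Int) (moving_list : List Bool), Dom_james_on_the_move start board moving_list → Pre_james_on_the_move start board moving_list → Spec_james_on_the_move start board moving_list (james_on_the_move start board moving_list)

-- ===== LEMMAS AND PROOFS =====

theorem jamesAux_succ (f : Nat) (s : Int) (board : List Int) (ml : List Bool) :
    jamesAux (f+1) s board ml =
      if s = (board.length : Int) - 1 then (true, ml)
      else if (board.length : Int) ≤ s ∨ s < 0 then (false, ml)
      else if PySem.List.pyGetD ml s false = true then (false, ml)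
      else
        let ml1 := PySem.List.pySetD ml s true
        let v := PySem.List.pyGetD board s 0
        let p := jamesAux f (s + v) board ml1
        if p.1 then (true, p.2) else jamesAux f (s - v) board p.2 := rfl

theorem jamesLoop_succ (f : Nat) (board : List Int) (c : Int) (rest : List Int) (ml : List Bool) :
    jamesLoop (f+1) board (c :: rest) ml =
      if c = (board.length : Int) - 1 then true
      else if (board.length : Int) ≤ c ∨ c < 0 then jamesLoop f board rest ml
      else if PySem.List.pyGetD ml c false = true then jamesLoop f board rest ml
      else
        jamesLoop f board
          ((c + PySem.List.pyGetD board c 0) :: (c - PySem.List.pyGetD board c 0) :: rest)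
          (PySem.List.pySetD ml c true) := rfl

theorem count_false_set_le (ml : List Bool) (i : Nat) :
    (ml.set i true).count false ≤ ml.count false := by
  induction ml generalizing i with
  | nil => simp
  | cons a tl ih =>
    cases i with
    | zero => cases a <;> simp [List.count_cons]
    | succ j => cases a <;> simpa [List.count_cons] using ih j

theorem count_false_set_eq (ml : List Bool) (i : Nat) (h : i < ml.length)
    (hf : ml.getD i true = false) :
    (ml.set i true).count false + 1 = ml.count false := by
  induction ml generalizing i with
  | nil => simp at h
  | cons a tl ih =>
    cases i with
    | zero => simp at hf; subst hf; simp [List.count_cons]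
    | succ j =>
      simp only [List.length_cons] at h
      have := ih j (by omega) (by simpa using hf)
      cases a <;> simp [List.count_cons] <;> omega

theorem jamesAux_len (f : Nat) (s : Int) (board : List Int) (ml : List Bool) :
    (jamesAux f s board ml).2.length = ml.length := by
  induction f generalizing s ml with
  | zero => simp [jamesAux]
  | succ f ih =>
    rw [jamesAux_succ]
    split_ifs with h1 h2 h3
    · rfl
    · rfl
    · rfl
    · simp only
      split_ifs with hp
      · simp [ih]
      · rw [ih, ih, PySem.List.length_pySetD]

theorem jamesAux_mono (f : Nat) (s : Int) (board : List Int) (ml : List Bool) :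
    (jamesAux f s board ml).2.count false ≤ ml.count false := by
  induction f generalizing s ml with
  | zero => simp [jamesAux]
  | succ f ih =>
    rw [jamesAux_succ]
    split_ifs with h1 h2 h3
    · simp
    · simp
    · simp
    · simp only
      have hset : (PySem.List.pySetD ml s true).count false ≤ ml.count false := by
        rw [PySem.List.pySetD_of_nonneg ml true (by omega : (0:Int) ≤ s)]
        exact count_false_set_le ml s.toNat
      split_ifs with hp
      · exact le_trans (ih _ _) hset
      · exact le_trans (le_trans (ih _ _) (ih _ _)) hset

-- in the live branch (0 ≤ s < board.length ≤ ml.length, cell unvisited) the mark strictly decreases count false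
theorem count_set_live (s : Int) (board : List Int) (ml : List Bool)
    (hlen : board.length ≤ ml.length)
    (h2 : ¬((board.length : Int) ≤ s ∨ s < 0))
    (h3 : ¬(PySem.List.pyGetD ml s false = true)) :
    (PySem.List.pySetD ml s true).count false + 1 = ml.count false := by
  push_neg at h2
  have hs0 : (0:Int) ≤ s := by omega
  have hsl : s.toNat < ml.length := by
    have : s < (board.length : Int) := h2.1
    omega
  rw [PySem.List.pySetD_of_nonneg ml true hs0]
  apply count_false_set_eq ml s.toNat hsl
  rw [PySem.List.pyGetD_eq_getElem ml false hs0 (by omega)] at h3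
  simp only [Bool.not_eq_true] at h3
  simp [List.getD, hsl, h3]

theorem jamesAux_fuel_succ (board : List Int) : ∀ (f : Nat) (s : Int) (ml : List Bool),
    board.length ≤ ml.length → ml.count false + 1 ≤ f →
    jamesAux (f+1) s board ml = jamesAux f s board ml := by
  intro f
  induction f with
  | zero => intro s ml _ hf; omega
  | succ f ih =>
    intro s ml hlen hf
    rw [jamesAux_succ, jamesAux_succ]
    split_ifs with h1 h2 h3
    · rfl
    · rfl
    · rfl
    · simp only
      have hdec := count_set_live s board ml hlen h2 h3
      have hlen1 : board.length ≤ (PySem.List.pySetD ml s true).length := by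
        rw [PySem.List.length_pySetD]; exact hlen
      have h1st : jamesAux (f+1) (s + PySem.List.pyGetD board s 0) board (PySem.List.pySetD ml s true)
          = jamesAux f (s + PySem.List.pyGetD board s 0) board (PySem.List.pySetD ml s true) :=
        ih _ _ hlen1 (by omega)
      rw [h1st]
      split_ifs with hp
      · rfl
      · apply ih
        · rw [jamesAux_len]; exact hlen1
        · have := jamesAux_mono f (s + PySem.List.pyGetD board s 0) board (PySem.List.pySetD ml s true)
          omega

theorem jamesAux_fuel_add (board : List Int) (d : Nat) : ∀ (f : Nat) (s : Int) (ml : List Bool),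
    board.length ≤ ml.length → ml.count false + 1 ≤ f →
    jamesAux (f+d) s board ml = jamesAux f s board ml := by
  induction d with
  | zero => intro f s ml _ _; rfl
  | succ d ih =>
    intro f s ml hlen hf
    have : f + (d+1) = (f+d) + 1 := by omega
    rw [this, jamesAux_fuel_succ board (f+d) s ml hlen (by omega), ih f s ml hlen hf]

theorem jamesAux_fuel_eq (board : List Int) (f g : Nat) (s : Int) (ml : List Bool)
    (hlen : board.length ≤ ml.length)
    (hf : ml.count false + 1 ≤ f) (hg : ml.count false + 1 ≤ g) :
    jamesAux f s board ml = jamesAux g s board ml := by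
  rcases Nat.le_total f g with h | h
  · obtain ⟨d, rfl⟩ := Nat.exists_eq_add_of_le h
    exact (jamesAux_fuel_add board d f s ml hlen hf).symm
  · obtain ⟨d, rfl⟩ := Nat.exists_eq_add_of_le h
    exact jamesAux_fuel_add board d g s ml hlen hg

-- the stack loop, expressed as a structural fold over the stack of A-style DFS runs
def foldA (board : List Int) : List Int → List Bool → Bool
  | [], _ => false
  | c :: rest, ml =>
    let p := jamesAux (ml.count false + 1) c board ml
    p.1 || foldA board rest p.2

theorem jamesLoop_eq_foldA (board : List Int) : ∀ (f : Nat) (stack : List Int) (ml : List Bool),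
    board.length ≤ ml.length → stack.length + 3 * ml.count false + 1 ≤ f →
    jamesLoop f board stack ml = foldA board stack ml := by
  intro f
  induction f with
  | zero =>
    intro stack ml _ hf; omega
  | succ f ih =>
    intro stack ml hlen hf
    cases stack with
    | nil => simp [jamesLoop, foldA]
    | cons c rest =>
      rw [jamesLoop_succ]
      simp only [foldA]
      rw [jamesAux_succ]
      split_ifs with h1 h2 h3
      · simp
      · simp only [List.length_cons] at hf
        simp [ih rest ml hlen (by omega)]
      · simp only [List.length_cons] at hf
        simp [ih rest ml hlen (by omega)]
      · simp only
        have hdec := count_set_live c board ml hlen h2 h3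
        set ml1 := PySem.List.pySetD ml c true with hml1
        set v := PySem.List.pyGetD board c 0 with hv
        have hlen1 : board.length ≤ ml1.length := by
          rw [hml1, PySem.List.length_pySetD]; exact hlen
        simp only [List.length_cons] at hf
        rw [ih ((c + v) :: (c - v) :: rest) ml1 hlen1 (by simp; omega)]
        simp only [foldA]
        -- inner fuel of A's first call is exactly ml1.count false + 1
        have hcnt : ml.count false = ml1.count false + 1 := by omega
        rw [hcnt]
        set q1 := jamesAux (ml1.count false + 1) (c + v) board ml1 with hq1
        split_ifs with hp
        · simp [hp]
        · simp only [hp, Bool.false_or]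
          have hlen2 : board.length ≤ q1.2.length := by rw [hq1, jamesAux_len]; exact hlen1
          have hm : q1.2.count false ≤ ml1.count false := by rw [hq1]; exact jamesAux_mono _ _ _ _
          rw [jamesAux_fuel_eq board (ml1.count false + 1) (q1.2.count false + 1) (c - v) q1.2
                hlen2 (by omega) (by omega)]

theorem james_on_the_move_spec : Claim_equal_james_on_the_move := by
  intro start board ml _ hpre
  unfold Spec_james_on_the_move james_on_the_move james_on_the_move_alt
  by_cases h1 : start = (board.length : Int) - 1
  · have hA : jamesAux (ml.count false + 1) start board ml = (true, ml) := by
      rw [jamesAux_succ]; simp [h1]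
    have : (3 : Nat) * ml.count false + 2 = (3 * ml.count false + 1) + 1 := rfl
    rw [hA, this, jamesLoop_succ]
    simp [h1]
  · by_cases h2 : (board.length : Int) ≤ start ∨ start < 0
    · have hA : jamesAux (ml.count false + 1) start board ml = (false, ml) := by
        rw [jamesAux_succ]; simp [h1, h2]
      have : (3 : Nat) * ml.count false + 2 = (3 * ml.count false + 1) + 1 := rfl
      rw [hA, this, jamesLoop_succ]
      simp [h1, h2, jamesLoop]
    · have hlen : board.length ≤ ml.length := by
        rcases hpre with h | h | h
        · exact h
        · exact absurd (Or.inr h) h2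
        · push_neg at h2
          exact absurd h1 (by omega)
      rw [jamesLoop_eq_foldA board _ [start] ml hlen (by simp; omega)]
      simp [foldA]
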